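-- pv_equiv track=rewrite | github.com/Lcrypto/ECC-over-GF2n | bound.py | find_conjugate
-- ===== SOURCE A (Python) =====
-- def find_conjugate( value, base, ext ):
-- 	conjugates = []
-- 	for index in range(0, 2**ext):
-- 		e = (value * (2**base)**index) % (2**ext-1)
-- 		if e not in conjugates:
-- 			conjugates.append(e)
-- 		else:
-- 			return conjugates
-- ===== SOURCE B (Python) =====
-- def find_conjugate(value, base, ext):
--     # 2 is invertible mod m = 2**ext - 1, so e -> e * 2**base mod m is a bijection:
--     # the orbit of value is a pure cycle whose first repeat is the starting element.
--     # Phase 1: find the period k by comparing against the first element only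
--     # (O(1) memory, no list/set membership); phase 2: regenerate the k conjugates.
--     m = 2**ext - 1
--     t = pow(2, base, m)
--     e0 = value % m
--     e = e0 * t % m
--     k = 1
--     while e != e0:
--         e = e * t % m
--         k += 1
--     out = []
--     e = e0
--     for _ in range(k):
--         out.append(e)
--         e = e * t % m
--     return out
-- ===== Notes on version B (the rewrite author's own statement) =====
-- stated objective: faster
-- what changed: B drops A's growing-list membership test entirely: since 2 is invertible mod 2^ext-1 the orbit is a pure cycle, so B finds the period k by comparing each incrementally computed element (one modular multiply per step instead of A's recomputed huge power value*(2**base)**index) against the FIRST element only, then regenerates the k conjugates in a second pass.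
-- outside the precondition, e.g. on find_conjugate(2, -1, 2): A returns None, B returns [2, 1]; on find_conjugate(0, -1, 2): A returns [0.0], B returns [0]
import Mathlib
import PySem

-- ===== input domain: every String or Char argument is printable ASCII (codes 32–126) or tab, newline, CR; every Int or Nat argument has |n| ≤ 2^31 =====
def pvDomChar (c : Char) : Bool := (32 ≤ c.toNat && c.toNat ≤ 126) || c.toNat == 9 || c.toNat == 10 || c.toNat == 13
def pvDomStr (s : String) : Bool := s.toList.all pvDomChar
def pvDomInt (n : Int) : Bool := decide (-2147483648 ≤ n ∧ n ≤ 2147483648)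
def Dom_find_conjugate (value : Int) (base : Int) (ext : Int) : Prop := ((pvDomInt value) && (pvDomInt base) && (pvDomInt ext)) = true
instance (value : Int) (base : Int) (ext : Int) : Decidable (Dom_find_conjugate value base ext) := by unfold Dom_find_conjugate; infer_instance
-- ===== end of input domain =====

-- B replaces A's recomputed huge power and growing-list membership by incremental modular
-- multiplication with cycle detection against the first element only (the orbit is a pure
-- cycle since 2 is invertible mod 2^ext-1), then regenerates the conjugates; objective: faster.


-- ===== PORT A =====
-- Python 2**n; exact for n ≥ 0 (Python yields a float for n < 0, excluded by Pre_).
def pvPow2 (n : Int) : Int := 2 ^ n.toNat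

-- the 'for index in range(0, 2**ext)' loop with its early return, as an index counter with
-- remaining-iteration fuel (Python's range is lazy; materializing it would not evaluate).
-- An exhausted loop is Python's 'return None' (not a list), unreachable under Pre_ —
-- we return the accumulator there.
def pvGoA (value : Int) (p : Int) (M : Int) (index : Nat) (fuel : Nat) (conjugates : List Int) : List Int :=
  match fuel with
  | 0 => conjugates
  | f + 1 =>
    let e := PySem.Int.mod (value * p ^ index) M
    if e ∈ conjugates then conjugates
    else pvGoA value p M (index + 1) f (conjugates ++ [e])

def find_conjugate (value : Int) (base : Int) (ext : Int) : List Int :=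
  pvGoA value (pvPow2 base) (pvPow2 ext - 1) 0 (pvPow2 ext).toNat []

-- ===== PORT B =====
-- phase 1, the 'while e != e0' loop counting the period; the Python loop always terminates
-- (at most 2**ext-1 residues), so fuel 2**ext suffices and exhaustion is unreachable under Pre_.
def pvPeriod (t : Int) (M : Int) (e0 : Int) (e : Int) (k : Nat) (fuel : Nat) : Nat :=
  match fuel with
  | 0 => k
  | f + 1 => if e = e0 then k else pvPeriod t M e0 (PySem.Int.mod (e * t) M) (k + 1) f

-- phase 2, the 'for _ in range(k)' loop emitting the k conjugates
def pvEmit (t : Int) (M : Int) (e : Int) (k : Nat) : List Int :=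
  match k with
  | 0 => []
  | c + 1 => e :: pvEmit t M (PySem.Int.mod (e * t) M) c

def find_conjugate_alt (value : Int) (base : Int) (ext : Int) : List Int :=
  let m := pvPow2 ext - 1
  let t := PySem.Int.mod (pvPow2 base) m   -- pow(2, base, m); exact for base ≥ 0 (Pre_)
  let e0 := PySem.Int.mod value m
  let k := pvPeriod t m e0 (PySem.Int.mod (e0 * t) m) 1 (pvPow2 ext).toNat
  pvEmit t m e0 k

-- ===== PRECONDITION & SPEC =====
-- Pre_: ext ≥ 1 and base ≥ 0; otherwise Python A raises ZeroDivisionError (ext = 0),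
-- or works with floats and returns a list of floats / None (ext < 0 or base < 0).
def Pre_find_conjugate (value : Int) (base : Int) (ext : Int) : Prop := 1 ≤ ext ∧ 0 ≤ base
instance (value : Int) (base : Int) (ext : Int) : Decidable (Pre_find_conjugate value base ext) := by unfold Pre_find_conjugate; infer_instance
def pvWitness_find_conjugate : Int × Int × Int := (3, 1, 4)

def Spec_find_conjugate (value : Int) (base : Int) (ext : Int) (out : List Int) : Prop := out = find_conjugate_alt value base ext
instance (value : Int) (base : Int) (ext : Int) (out : List Int) : Decidable (Spec_find_conjugate value base ext out) := by unfold Spec_find_conjugate; infer_instance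

-- ===== CLAIM (what is proved, stated in full; the proofs are below) =====
def Claim_equal_find_conjugate : Prop := ∀ (value : Int) (base : Int) (ext : Int), Dom_find_conjugate value base ext → Pre_find_conjugate value base ext → Spec_find_conjugate value base ext (find_conjugate value base ext)

-- ===== LEMMAS AND PROOFS =====

-- the j-th conjugate as A computes it: value * p^j reduced mod m (emod; m > 0 on Pre_)
def pvE (value : Int) (p : Int) (m : Int) (j : Nat) : Int := (value * p ^ j) % m

lemma pvE_mod (value p m : Int) (hm : 0 < m) (j : Nat) :
    PySem.Int.mod (value * p ^ j) m = pvE value p m j := by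
  simp [PySem.Int.mod_eq_emod_of_pos hm, pvE]

-- one incremental step of B equals the next conjugate
lemma pvE_step (value p m : Int) (hm : 0 < m) (j : Nat) :
    PySem.Int.mod (pvE value p m j * (p % m)) m = pvE value p m (j + 1) := by
  simp only [PySem.Int.mod_eq_emod_of_pos hm, pvE]
  rw [← Int.mul_emod, pow_succ, ← mul_assoc]

-- cancellation: the step map is injective (p has an inverse mod m), so a repeat at (i, j)
-- forces a repeat at (0, j - i)
lemma pvE_cancel (value p m : Int) (E : Nat) (hE : 1 ≤ E) (h1 : p ^ E ≡ 1 [ZMOD m])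
    (i j : Nat) (hij : i ≤ j) (h : pvE value p m i = pvE value p m j) :
    pvE value p m (j - i) = pvE value p m 0 := by
  have h' : value * p ^ j ≡ value * p ^ i [ZMOD m] := (Int.ModEq.symm h)
  have hmul : value * p ^ j * p ^ (i * (E - 1)) ≡ value * p ^ i * p ^ (i * (E - 1)) [ZMOD m] :=
    h'.mul_right _
  have e2 : i * E = i * (E - 1) + i := by
    cases E with
    | zero => omega
    | succ n => simp [Nat.mul_succ]
  have hiE : p ^ (i * E) ≡ 1 [ZMOD m] := by
    calc p ^ (i * E) = (p ^ E) ^ i := by rw [Nat.mul_comm, pow_mul]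
    _ ≡ 1 ^ i [ZMOD m] := h1.pow i
    _ = 1 := one_pow i
  have hL : value * p ^ j * p ^ (i * (E - 1)) = value * p ^ (j - i) * p ^ (i * E) := by
    rw [mul_assoc, mul_assoc, ← pow_add, ← pow_add]
    congr 2
    rw [e2]
    omega
  have hR : value * p ^ i * p ^ (i * (E - 1)) = value * p ^ (i * E) := by
    rw [mul_assoc, ← pow_add]
    congr 2
    rw [e2]
    omega
  rw [hL, hR] at hmul
  have : value * p ^ (j - i) ≡ value [ZMOD m] := by
    calc value * p ^ (j - i) = value * p ^ (j - i) * 1 := by ring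
    _ ≡ value * p ^ (j - i) * p ^ (i * E) [ZMOD m] := (hiE.symm.mul_left _)
    _ ≡ value * p ^ (i * E) [ZMOD m] := hmul
    _ ≡ value * 1 [ZMOD m] := hiE.mul_left _
    _ = value := by ring
  simpa [pvE] using this

-- pigeonhole: some repeat occurs among the first m.toNat + 1 conjugates
lemma pvE_repeat (value p m : Int) (hm : 0 < m) :
    ∃ i j : Nat, i < j ∧ j ≤ m.toNat ∧ pvE value p m i = pvE value p m j := by
  have hmaps : ∀ a ∈ Finset.range (m.toNat + 1), pvE value p m a ∈ Finset.Icc (0 : Int) (m - 1) := by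
    intro a _
    refine Finset.mem_Icc.mpr ⟨Int.emod_nonneg _ (by omega), by
      have := Int.emod_lt_of_pos (value * p ^ a) hm
      simpa [pvE] using by omega⟩
  have hcard : (Finset.Icc (0 : Int) (m - 1)).card < (Finset.range (m.toNat + 1)).card := by
    rw [Int.card_Icc, Finset.card_range]
    omega
  obtain ⟨a, ha, b, hb, hab, hfab⟩ :=
    Finset.exists_ne_map_eq_of_card_lt_of_maps_to hcard hmaps
  simp only [Finset.mem_range] at ha hb
  rcases Nat.lt_or_ge a b with h | h
  · exact ⟨a, b, h, by omega, hfab⟩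
  · exact ⟨b, a, by omega, by omega, hfab.symm⟩

-- existence of a return to the start within m.toNat steps
lemma pvE_return (value p m : Int) (hm : 0 < m) (E : Nat) (hE : 1 ≤ E) (h1 : p ^ E ≡ 1 [ZMOD m]) :
    ∃ j : Nat, (1 ≤ j ∧ pvE value p m j = pvE value p m 0) ∧ j ≤ m.toNat := by
  obtain ⟨i, j, hij, hjm, h⟩ := pvE_repeat value p m hm
  refine ⟨j - i, ⟨by omega, ?_⟩, by omega⟩
  exact pvE_cancel value p m E hE h1 i j (le_of_lt hij) h

-- A's loop, run with accumulator [pvE 0, …, pvE (j-1)], returns the first k conjugates,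
-- where k is the least index ≥ 1 returning to pvE 0
lemma pvGoA_run (value p m : Int) (hm : 0 < m) (k : Nat) (hk1 : 1 ≤ k)
    (hkE : pvE value p m k = pvE value p m 0)
    (hmin : ∀ i, 1 ≤ i → i < k → pvE value p m i ≠ pvE value p m 0)
    (E : Nat) (hE : 1 ≤ E) (h1 : p ^ E ≡ 1 [ZMOD m]) :
    ∀ (n j : Nat), j ≤ k → k < j + n →
      pvGoA value p m j n ((List.range j).map (pvE value p m)) = (List.range k).map (pvE value p m) := by
  intro n
  induction n with
  | zero => intro j hjk hkn; omega
  | succ f ih =>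
    intro j hjk hkn
    rw [pvGoA]
    simp only [pvE_mod value p m hm j]
    rcases Nat.lt_or_ge j k with hj | hj
    · have hnotmem : pvE value p m j ∉ (List.range j).map (pvE value p m) := by
        intro hmem
        obtain ⟨i, hi, hie⟩ := List.mem_map.mp hmem
        rw [List.mem_range] at hi
        have := pvE_cancel value p m E hE h1 i j (le_of_lt hi) hie
        exact hmin (j - i) (by omega) (by omega) this
      simp only [hnotmem, if_false]
      have : (List.range j).map (pvE value p m) ++ [pvE value p m j]
          = (List.range (j + 1)).map (pvE value p m) := by
        rw [List.range_succ, List.map_append, List.map_singleton]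
      rw [this]
      exact ih (j + 1) (by omega) (by omega)
    · have hjk' : j = k := by omega
      subst hjk'
      have hmem : pvE value p m j ∈ (List.range j).map (pvE value p m) := by
        rw [hkE]
        exact List.mem_map.mpr ⟨0, List.mem_range.mpr (by omega), rfl⟩
      simp [hmem]

-- B's phase-1 loop finds exactly k
lemma pvPeriod_run (value p m : Int) (hm : 0 < m) (k : Nat)
    (hkE : pvE value p m k = pvE value p m 0)
    (hmin : ∀ i, 1 ≤ i → i < k → pvE value p m i ≠ pvE value p m 0) :
    ∀ (n j : Nat), 1 ≤ j → j ≤ k → k < j + n →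
      pvPeriod (p % m) m (pvE value p m 0) (pvE value p m j) j n = k := by
  intro n
  induction n with
  | zero => intro j h1j hjk hkn; omega
  | succ f ih =>
    intro j h1j hjk hkn
    rw [pvPeriod]
    by_cases h : pvE value p m j = pvE value p m 0
    · have : ¬ j < k := fun hlt => hmin j h1j hlt h
      simp only [h, if_true]
      omega
    · have hjk' : j < k := by
        rcases Nat.lt_or_ge j k with h' | h'
        · exact h'
        · exact absurd (by rw [show j = k by omega]; exact hkE) h
      simp only [h, if_false]
      rw [pvE_step value p m hm j]
      exact ih (j + 1) (by omega) (by omega) (by omega)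

-- B's phase-2 loop emits the conjugates from position j
lemma pvEmit_run (value p m : Int) (hm : 0 < m) :
    ∀ (c j : Nat), pvEmit (p % m) m (pvE value p m j) c = (List.range c).map (fun i => pvE value p m (j + i)) := by
  intro c
  induction c with
  | zero => intro j; rfl
  | succ c ih =>
    intro j
    rw [pvEmit, pvE_step value p m hm j, ih (j + 1)]
    rw [List.range_succ_eq_map, List.map_cons, List.map_map]
    congr 1
    refine List.map_congr_left (fun a _ => ?_)
    simp only [Function.comp_apply]
    congr 1
    omega

-- ===== VERDICT (by name: the statement is the Claim_ definition above) =====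
theorem find_conjugate_spec : Claim_equal_find_conjugate := by
  intro value base ext _ hpre
  obtain ⟨hext, hbase⟩ := hpre
  unfold Spec_find_conjugate find_conjugate find_conjugate_alt
  set p := pvPow2 base with hp
  set m := pvPow2 ext - 1 with hmdef
  have h2 : (2:Int) ≤ 2 ^ ext.toNat := by
    calc (2:Int) = 2 ^ 1 := by norm_num
    _ ≤ 2 ^ ext.toNat := by
      apply pow_le_pow_right₀ (by norm_num)
      omega
  have hm : 0 < m := by simp only [hmdef, pvPow2]; omega
  have hE : 1 ≤ ext.toNat := by omega
  have h1 : p ^ ext.toNat ≡ 1 [ZMOD m] := by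
    have hdvd : m ∣ (2:Int) ^ ext.toNat - 1 := by rw [hmdef]; simp [pvPow2]
    have h2e : (2:Int) ^ ext.toNat ≡ 1 [ZMOD m] :=
      (Int.modEq_iff_dvd.mpr (by simpa using hdvd)).symm
    calc p ^ ext.toNat = ((2:Int) ^ base.toNat) ^ ext.toNat := by rw [hp]; rfl
    _ = ((2:Int) ^ ext.toNat) ^ base.toNat := by rw [← pow_mul, ← pow_mul, Nat.mul_comm]
    _ ≡ 1 ^ base.toNat [ZMOD m] := h2e.pow _
    _ = 1 := one_pow _
  -- the least return index k
  have hex := pvE_return value p m hm ext.toNat hE h1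
  have hexk : ∃ j : Nat, 1 ≤ j ∧ pvE value p m j = pvE value p m 0 := ⟨hex.choose, hex.choose_spec.1⟩
  set k := Nat.find hexk with hkdef
  have hk1 : 1 ≤ k := (Nat.find_spec hexk).1
  have hkE : pvE value p m k = pvE value p m 0 := (Nat.find_spec hexk).2
  have hmin : ∀ i, 1 ≤ i → i < k → pvE value p m i ≠ pvE value p m 0 := by
    intro i h1i hik h
    exact Nat.find_min hexk hik ⟨h1i, h⟩
  have hkm : k ≤ m.toNat := le_trans (Nat.find_min' hexk hex.choose_spec.1) hex.choose_spec.2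
  have hfuel : m.toNat < (pvPow2 ext).toNat := by
    simp only [hmdef, pvPow2]
    omega
  -- A's side
  have hA : pvGoA value p m 0 (pvPow2 ext).toNat [] = (List.range k).map (pvE value p m) := by
    have := pvGoA_run value p m hm k hk1 hkE hmin ext.toNat hE h1 (pvPow2 ext).toNat 0 (by omega) (by omega)
    simpa using this
  -- B's side
  have he0 : PySem.Int.mod value m = pvE value p m 0 := by
    have := pvE_mod value p m hm 0
    simpa using this
  have ht : PySem.Int.mod p m = p % m := PySem.Int.mod_eq_emod_of_pos hm
  have he1 : PySem.Int.mod (pvE value p m 0 * (p % m)) m = pvE value p m 1 := pvE_step value p m hm 0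
  have hB : pvPeriod (p % m) m (pvE value p m 0) (pvE value p m 1) 1 (pvPow2 ext).toNat = k :=
    pvPeriod_run value p m hm k hkE hmin (pvPow2 ext).toNat 1 le_rfl hk1 (by omega)
  rw [hA]
  simp only [ht, he0, he1, hB]
  have := pvEmit_run value p m hm k 0
  rw [this]
  simp
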